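-- pv_equiv track=rewrite | github.com/rubelw/OSSS | src/OSSS/ai/agents/query_data/handlers/gradebook_entries_handler.py | _build_gradebook_entries_markdown_table
-- ===== SOURCE A (Python) =====
-- from typing import Any, Dict, List, Sequence
--
-- MAX_MARKDOWN_ROWS = 50
--
-- def _escape_md(value: Any) -> str:
--     """
--     Escape markdown-unfriendly characters for safe table rendering.
--     """
--     text = "" if value is None else str(value)
--     return text.replace("|", r"\|").replace("`", r"\`")
--
-- def _select_gradebook_entries_fields(
--     rows: Sequence[Dict[str, Any]],
-- ) -> List[str]:
--     """
--     Choose a stable, user-friendly column ordering, but gracefully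
--     include any extra keys that the API returns.
--     """
--     if not rows:
--         return []
--
--     # Adjust this preferred order to whatever your gradebook_entries schema actually is.
--     preferred_order = [
--         "id",
--         "student_id",
--         "student_number",
--         "student_name",
--         "section_id",
--         "section_name",
--         "course_code",
--         "course_name",
--         "assignment_id",
--         "assignment_name",
--         "category",
--         "date_assigned",
--         "date_due",
--         "date_submitted",
--         "points_earned",
--         "points_possible",
--         "score_pct",
--         "letter_grade",
--         "is_missing",
--         "is_excused",
--         "grading_period_id",
--         "grading_period_code",
--         "created_at",
--         "updated_at",
--     ]
--
--     all_keys: List[str] = []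
--     for r in rows:
--         for k in r.keys():
--             if k not in all_keys:
--                 all_keys.append(k)
--
--     ordered = [k for k in preferred_order if k in all_keys]
--     ordered.extend(k for k in all_keys if k not in ordered)
--     return ordered
--
-- def _build_gradebook_entries_markdown_table(
--     rows: List[Dict[str, Any]],
-- ) -> str:
--     """
--     Render gradebook_entries rows as a markdown table with row limits
--     and a friendly truncation notice.
--     """
--     if not rows:
--         return "No gradebook_entries records were found in the system."
--
--     total = len(rows)
--     display = rows[:MAX_MARKDOWN_ROWS]
--
--     fieldnames = _select_gradebook_entries_fields(display)
--     if not fieldnames: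
--         return "No gradebook_entries records were found in the system."
--
--     header_cells = ["#"] + fieldnames
--     header = f"| {' | '.join(header_cells)} |\n"
--     separator = f"| {' | '.join(['---'] * len(header_cells))} |\n"
--
--     lines: List[str] = []
--     for idx, r in enumerate(display, start=1):
--         row_cells = [_escape_md(idx)] + [
--             _escape_md(r.get(f, "")) for f in fieldnames
--         ]
--         lines.append(f"| {' | '.join(row_cells)} |")
--
--     table = header + separator + "\n".join(lines)
--
--     if total > MAX_MARKDOWN_ROWS:
--         table += (
--             f"\n\n_Showing first {MAX_MARKDOWN_ROWS} of {total} "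
--             "gradebook entry records. You can request CSV to see the full dataset._"
--         )
--
--     return table
-- ===== SOURCE B (Python) =====
-- from typing import Any, Dict, List, Sequence
--
-- MAX_MARKDOWN_ROWS = 50
--
-- PREFERRED_ORDER = [
--     "id", "student_id", "student_number", "student_name",
--     "section_id", "section_name", "course_code", "course_name",
--     "assignment_id", "assignment_name", "category",
--     "date_assigned", "date_due", "date_submitted",
--     "points_earned", "points_possible", "score_pct", "letter_grade",
--     "is_missing", "is_excused",
--     "grading_period_id", "grading_period_code",
--     "created_at", "updated_at",
-- ]
--
-- _RANK = {k: i for i, k in enumerate(PREFERRED_ORDER)}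
--
--
-- def _escape_md(value: Any) -> str:
--     text = "" if value is None else str(value)
--     return text.replace("|", r"\|").replace("`", r"\`")
--
--
-- def _select_fields(rows: Sequence[Dict[str, Any]]) -> List[str]:
--     # distinct keys in first-seen order, then a stable sort by preferred rank:
--     # preferred keys come first in schema order, the rest keep insertion order.
--     distinct = list(dict.fromkeys(k for r in rows for k in r.keys()))
--     return sorted(distinct, key=lambda k: _RANK.get(k, len(PREFERRED_ORDER)))
--
--
-- def _build_gradebook_entries_markdown_table(rows: List[Dict[str, Any]]) -> str:
--     if not rows:
--         return "No gradebook_entries records were found in the system."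
--
--     total = len(rows)
--     display = rows[:MAX_MARKDOWN_ROWS]
--
--     fields = _select_fields(display)
--     if not fields:
--         return "No gradebook_entries records were found in the system."
--
--     cols = ["#"] + fields
--     all_lines = [" | ".join(cols), " | ".join(["---"] * len(cols))]
--     for i, r in enumerate(display, start=1):
--         cells = [str(i)] + [r.get(f, "") for f in fields]
--         all_lines.append(" | ".join(_escape_md(c) for c in cells))
--
--     table = "\n".join(f"| {ln} |" for ln in all_lines)
--
--     if total > MAX_MARKDOWN_ROWS:
--         table += (
--             f"\n\n_Showing first {MAX_MARKDOWN_ROWS} of {total} "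
--             "gradebook entry records. You can request CSV to see the full dataset._"
--         )
--     return table
-- ===== Notes on version B (the rewrite author's own statement) =====
-- stated objective: faster
-- what changed: The column-ordering helper's two partitioning comprehensions with O(k^2) 'k not in ordered' list membership are replaced by a rank table plus one stable sort (dict.fromkeys dedup, sorted by rank.get with a default), and the table body is assembled as one uniform list of lines joined once instead of header/separator strings concatenated with a separately joined row list.
import Mathlib
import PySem

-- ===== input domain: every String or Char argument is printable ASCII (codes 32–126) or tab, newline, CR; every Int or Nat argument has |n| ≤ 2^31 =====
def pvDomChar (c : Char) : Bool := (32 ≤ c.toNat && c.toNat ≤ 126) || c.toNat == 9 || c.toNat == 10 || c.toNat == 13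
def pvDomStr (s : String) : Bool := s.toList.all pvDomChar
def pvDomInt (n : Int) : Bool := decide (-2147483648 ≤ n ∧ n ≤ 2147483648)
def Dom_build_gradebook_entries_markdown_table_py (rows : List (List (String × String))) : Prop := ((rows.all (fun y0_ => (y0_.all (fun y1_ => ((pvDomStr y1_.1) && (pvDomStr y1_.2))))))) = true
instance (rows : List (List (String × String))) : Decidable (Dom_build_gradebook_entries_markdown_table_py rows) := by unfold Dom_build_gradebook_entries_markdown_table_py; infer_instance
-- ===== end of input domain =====

-- B reorders the columns with a rank table + one stable sort (instead of two partitioning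
-- comprehensions with quadratic list membership) and assembles the table as a single joined
-- list of lines; same output, proved equal on the whole domain.


-- shared module context (both Source A and Source B): the escape helper and the preferred schema order
def pvEscapeMd (v : String) : String :=
  PySem.Str.replace (PySem.Str.replace v "|" "\\|") "`" "\\`"

def pvPreferredOrder : List String :=
  ["id", "student_id", "student_number", "student_name",
   "section_id", "section_name", "course_code", "course_name",
   "assignment_id", "assignment_name", "category",
   "date_assigned", "date_due", "date_submitted",
   "points_earned", "points_possible", "score_pct", "letter_grade",
   "is_missing", "is_excused",
   "grading_period_id", "grading_period_code",
   "created_at", "updated_at"]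

-- ===== PORT A =====
def pvSelectFields (rows : List (List (String × String))) : List String :=
  if rows = [] then []
  else
    let allKeys := rows.foldl
      (fun acc r => (PySem.Dict.ofList r).keys.foldl
        (fun acc2 k => if k ∈ acc2 then acc2 else acc2 ++ [k]) acc) []
    let ordered := pvPreferredOrder.filter (fun k => k ∈ allKeys)
    ordered ++ allKeys.filter (fun k => ¬ k ∈ ordered)

def build_gradebook_entries_markdown_table_py (rows : List (List (String × String))) : String :=
  if rows = [] then "No gradebook_entries records were found in the system."
  else
    let total := PySem.List.len rows
    let display := PySem.List.slice rows none (some 50)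
    let fieldnames := pvSelectFields display
    if fieldnames = [] then "No gradebook_entries records were found in the system."
    else
      let headerCells := "#" :: fieldnames
      let header := "| " ++ PySem.Str.join " | " headerCells ++ " |\n"
      let separator := "| " ++ PySem.Str.join " | " (List.replicate headerCells.length "---") ++ " |\n"
      let lines := (PySem.List.enumerate display 1).map (fun ir =>
        "| " ++ PySem.Str.join " | "
          (pvEscapeMd (PySem.Int.toStr ir.1) ::
            fieldnames.map (fun f => pvEscapeMd ((PySem.Dict.ofList ir.2).getD f ""))) ++ " |")
      let table := header ++ separator ++ PySem.Str.join "\n" lines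
      if total > 50 then
        table ++ "\n\n_Showing first 50 of " ++ PySem.Int.toStr total ++
          " gradebook entry records. You can request CSV to see the full dataset._"
      else table

-- ===== PORT B =====
def pvRank : PySem.Dict String Nat :=
  pvPreferredOrder.zipIdx.foldl (fun d ki => d.insert ki.1 ki.2) PySem.Dict.empty

def pvFieldKey (k : String) : Nat := pvRank.getD k pvPreferredOrder.length

def pvSelectFieldsAlt (rows : List (List (String × String))) : List String :=
  PySem.List.sorted
    (PySem.List.dedup (rows.flatMap (fun r => (PySem.Dict.ofList r).keys)))
    pvFieldKey

def build_gradebook_entries_markdown_table_py_alt (rows : List (List (String × String))) : String :=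
  if rows = [] then "No gradebook_entries records were found in the system."
  else
    let total := PySem.List.len rows
    let display := PySem.List.slice rows none (some 50)
    let fields := pvSelectFieldsAlt display
    if fields = [] then "No gradebook_entries records were found in the system."
    else
      let cols := "#" :: fields
      let allLines :=
        PySem.Str.join " | " cols ::
        PySem.Str.join " | " (List.replicate cols.length "---") ::
        (PySem.List.enumerate display 1).map (fun ir =>
          PySem.Str.join " | "
            (([PySem.Int.toStr ir.1] ++
              fields.map (fun f => (PySem.Dict.ofList ir.2).getD f "")).map pvEscapeMd))
      let table := PySem.Str.join "\n" (allLines.map (fun ln => "| " ++ ln ++ " |"))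
      if total > 50 then
        table ++ "\n\n_Showing first 50 of " ++ PySem.Int.toStr total ++
          " gradebook entry records. You can request CSV to see the full dataset._"
      else table

-- ===== PRECONDITION & SPEC =====
def Spec_build_gradebook_entries_markdown_table_py (rows : List (List (String × String))) (out : String) : Prop := out = build_gradebook_entries_markdown_table_py_alt rows
instance (rows : List (List (String × String))) (out : String) : Decidable (Spec_build_gradebook_entries_markdown_table_py rows out) := by unfold Spec_build_gradebook_entries_markdown_table_py; infer_instance

-- ===== CLAIM (what is proved, stated in full; the proofs are below) =====
def Claim_equal_build_gradebook_entries_markdown_table_py : Prop := ∀ (rows : List (List (String × String))), Dom_build_gradebook_entries_markdown_table_py rows → Spec_build_gradebook_entries_markdown_table_py rows (build_gradebook_entries_markdown_table_py rows)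

-- ===== LEMMAS AND PROOFS =====

theorem pv_foldl_eq {α β : Type} (f g : β → α → β) (l : List α) (b : β)
    (h : ∀ b a, f b a = g b a) : l.foldl f b = l.foldl g b := by
  induction l generalizing b with
  | nil => rfl
  | cons a l ih => simp only [List.foldl_cons, h, ih]

-- A's nested "if k not in acc: acc.append(k)" loop is ordered dedup of the concatenated key lists
theorem pv_allKeys_gen {α β : Type} [BEq β] [LawfulBEq β] (g : α → List β) (rows : List α) (acc : List β) :
    rows.foldl (fun acc r => (g r).foldl (fun acc2 k => if k ∈ acc2 then acc2 else acc2 ++ [k]) acc) acc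
      = (rows.flatMap g).foldl PySem.Set.add acc := by
  induction rows generalizing acc with
  | nil => rfl
  | cons r rs ih =>
      simp only [List.foldl_cons, List.flatMap_cons, List.foldl_append, ih]
      congr 1
      exact pv_foldl_eq _ _ _ _ (by intro b a; simp [PySem.Set.add])

-- the rank dict built from enumerate(preferred) looks up the index in preferred
theorem pv_build_get? (P : List String) (hnd : P.Nodup) (k : String) :
    (P.zipIdx.foldl (fun d ki => d.insert ki.1 ki.2) PySem.Dict.empty).get? k
      = if k ∈ P then some (P.idxOf k) else none := by
  induction P using List.reverseRecOn with
  | nil => simp [PySem.Dict.get?, PySem.Dict.empty]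
  | append_singleton P x ih =>
      obtain ⟨hnd', -, hdisj⟩ := List.nodup_append.mp hnd
      have hx : x ∉ P := fun hmem => hdisj x hmem x (by simp) rfl
      rw [List.zipIdx_append, List.foldl_append]
      simp only [List.zipIdx, List.foldl_cons, List.foldl_nil]
      by_cases hk : k = x
      · subst hk
        rw [PySem.Dict.get?_insert_self]
        simp [List.idxOf_append, hx]
      · rw [PySem.Dict.get?_insert_of_ne _ _ hk, ih hnd']
        by_cases hm : k ∈ P
        · simp [hm, List.idxOf_append]
        · simp [hm, hk]

theorem pv_pref_nodup : pvPreferredOrder.Nodup := by decide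

theorem pv_fieldKey_mem (k : String) (h : k ∈ pvPreferredOrder) :
    pvFieldKey k = pvPreferredOrder.idxOf k := by
  simp [pvFieldKey, pvRank, PySem.Dict.getD, pv_build_get? _ pv_pref_nodup, h]

theorem pv_fieldKey_not_mem (k : String) (h : ¬ k ∈ pvPreferredOrder) :
    pvFieldKey k = pvPreferredOrder.length := by
  simp [pvFieldKey, pvRank, PySem.Dict.getD, pv_build_get? _ pv_pref_nodup, h]

theorem pv_fieldKey_le (k : String) : pvFieldKey k ≤ pvPreferredOrder.length := by
  by_cases h : k ∈ pvPreferredOrder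
  · rw [pv_fieldKey_mem k h]
    exact le_of_lt (List.idxOf_lt_length_of_mem h)
  · rw [pv_fieldKey_not_mem k h]

-- insertion skips a prefix it does not go before
theorem pv_insertBy_append {α : Type} (before : α → α → Bool) (x : α)
    (as bs : List α) (h : ∀ y ∈ as, before x y = false) :
    PySem.List.insertBy before x (as ++ bs) = as ++ PySem.List.insertBy before x bs := by
  induction as with
  | nil => rfl
  | cons a as ih =>
      have ha := h a (by simp)
      simp only [List.cons_append, PySem.List.insertBy, ha]
      simp only [Bool.false_eq_true, if_false]
      exact congrArg (a :: ·) (by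
        have := ih (fun y hy => h y (by simp [hy]))
        simpa [PySem.List.insertBy] using this)

theorem pv_insertBy_head {α : Type} (before : α → α → Bool) (x : α)
    (bs : List α) (h : ∀ y ∈ bs, before x y = true) :
    PySem.List.insertBy before x bs = x :: bs := by
  cases bs with
  | nil => rfl
  | cons b t => simp [PySem.List.insertBy, h b (by simp)]

-- the stable sort by rank: preferred keys (in schema order) first, then the rest in input order
theorem pv_sorted_rank (ks : List String) (hnd : ks.Nodup) :
    PySem.List.sorted ks pvFieldKey
      = pvPreferredOrder.filter (fun k => k ∈ ks) ++ ks.filter (fun k => ¬ k ∈ pvPreferredOrder) := by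
  rw [PySem.List.sorted_eq_foldl_insertBy]
  induction ks using List.reverseRecOn with
  | nil => simp
  | append_singleton ks x ih =>
      obtain ⟨hnd', -, hdisj⟩ := List.nodup_append.mp hnd
      have hx : x ∉ ks := fun hmem => hdisj x hmem x (by simp) rfl
      rw [List.foldl_append, List.foldl_cons, List.foldl_nil, ih hnd']
      by_cases hxP : x ∈ pvPreferredOrder
      · -- x is a preferred key: it is inserted at its schema position
        obtain ⟨P1, P2, hP⟩ := List.append_of_mem hxP
        have hPnd := pv_pref_nodup
        rw [hP] at hPnd
        obtain ⟨hnd1, hnd2, hdisjP⟩ := List.nodup_append.mp hPnd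
        have hxP1 : x ∉ P1 := fun hm => hdisjP x hm x (by simp) rfl
        have hxP2 : x ∉ P2 := by
          have := hnd2
          simp only [List.nodup_cons] at this
          exact this.1
        have hkx : pvFieldKey x = P1.length := by
          rw [pv_fieldKey_mem x hxP, hP, List.idxOf_append, if_neg hxP1,
            List.idxOf_cons_self]
          omega
        have hk1 : ∀ y ∈ P1, pvFieldKey y < P1.length := by
          intro y hy
          have hyP : y ∈ pvPreferredOrder := by rw [hP]; simp [hy]
          rw [pv_fieldKey_mem y hyP, hP, List.idxOf_append, if_pos hy]
          exact List.idxOf_lt_length_of_mem hy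
        have hk2 : ∀ y ∈ P2, P1.length < pvFieldKey y := by
          intro y hy
          have hyx : y ≠ x := fun he => hxP2 (he ▸ hy)
          have hyP1 : y ∉ P1 := fun hm => hdisjP y hm y (by simp [hy]) rfl
          have hyP : y ∈ pvPreferredOrder := by rw [hP]; simp [hy]
          rw [pv_fieldKey_mem y hyP, hP, List.idxOf_append, if_neg hyP1]
          have hpos : 0 < List.idxOf y (x :: P2) := by
            rcases Nat.eq_zero_or_pos (List.idxOf y (x :: P2)) with h0 | h0
            · exfalso
              have hmem : y ∈ x :: P2 := by simp [hy]
              have := List.idxOf_lt_length_of_mem hmem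
              have hget : (x :: P2)[List.idxOf y (x :: P2)] = y := List.getElem_idxOf this
              simp only [h0] at hget
              simp at hget
              exact hyx hget.symm
            · exact h0
          omega
        have hkxlt : pvFieldKey x < pvPreferredOrder.length := by
          rw [pv_fieldKey_mem x hxP]; exact List.idxOf_lt_length_of_mem hxP
        -- rewrite both filters of pvPreferredOrder through the split P1 ++ x :: P2
        have hfilter1 : pvPreferredOrder.filter (fun k => decide (k ∈ ks)) =
            P1.filter (fun k => decide (k ∈ ks)) ++ P2.filter (fun k => decide (k ∈ ks)) := by
          rw [hP, List.filter_append, List.filter_cons, if_neg (by simp [hx])]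
        have hfilter2 : pvPreferredOrder.filter (fun k => decide (k ∈ ks ++ [x])) =
            P1.filter (fun k => decide (k ∈ ks)) ++ x :: P2.filter (fun k => decide (k ∈ ks)) := by
          rw [hP, List.filter_append, List.filter_cons, if_pos (by simp)]
          have e1 : P1.filter (fun k => decide (k ∈ ks ++ [x])) = P1.filter (fun k => decide (k ∈ ks)) := by
            refine List.filter_congr ?_
            intro y hy
            have : y ≠ x := fun he => hxP1 (he ▸ hy)
            simp [this]
          have e2 : P2.filter (fun k => decide (k ∈ ks ++ [x])) = P2.filter (fun k => decide (k ∈ ks)) := by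
            refine List.filter_congr ?_
            intro y hy
            have : y ≠ x := fun he => hxP2 (he ▸ hy)
            simp [this]
          rw [e1, e2]
        have hfilter3 : (ks ++ [x]).filter (fun k => decide (¬ k ∈ pvPreferredOrder)) =
            ks.filter (fun k => decide (¬ k ∈ pvPreferredOrder)) := by
          rw [List.filter_append, List.filter_cons, if_neg (by simp [hxP]), List.filter_nil,
            List.append_nil]
        have h1 : ∀ y ∈ P1.filter (fun k => decide (k ∈ ks)),
            (fun a b => decide (pvFieldKey a < pvFieldKey b)) x y = false := by
          intro y hy
          show decide (pvFieldKey x < pvFieldKey y) = false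
          simp only [List.mem_filter] at hy
          have := hk1 y hy.1
          simp only [decide_eq_false_iff_not]
          omega
        have h2 : ∀ y ∈ P2.filter (fun k => decide (k ∈ ks)) ++
            ks.filter (fun k => decide (¬ k ∈ pvPreferredOrder)),
            (fun a b => decide (pvFieldKey a < pvFieldKey b)) x y = true := by
          intro y hy
          show decide (pvFieldKey x < pvFieldKey y) = true
          simp only [List.mem_append, List.mem_filter] at hy
          rcases hy with hy | hy
          · have := hk2 y hy.1
            simp only [decide_eq_true_eq]
            omega
          · have hyNP : ¬ y ∈ pvPreferredOrder := by simpa using hy.2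
            rw [pv_fieldKey_not_mem y hyNP]
            simp only [decide_eq_true_eq]
            omega
        rw [hfilter1, hfilter2, hfilter3, List.append_assoc,
          pv_insertBy_append _ _ _ _ h1, pv_insertBy_head _ _ _ h2]
        simp
      · -- x is not preferred: it keeps insertion order at the end
        have hkx : pvFieldKey x = pvPreferredOrder.length := pv_fieldKey_not_mem x hxP
        have hno : ∀ y ∈ pvPreferredOrder.filter (fun k => decide (k ∈ ks)) ++
            ks.filter (fun k => decide (¬ k ∈ pvPreferredOrder)),
            (fun a b => decide (pvFieldKey a < pvFieldKey b)) x y = false := by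
          intro y hy
          show decide (pvFieldKey x < pvFieldKey y) = false
          have := pv_fieldKey_le y
          simp only [decide_eq_false_iff_not]
          omega
        have hfilter1 : pvPreferredOrder.filter (fun k => decide (k ∈ ks ++ [x])) =
            pvPreferredOrder.filter (fun k => decide (k ∈ ks)) := by
          refine List.filter_congr ?_
          intro y hy
          have : y ≠ x := fun he => hxP (he ▸ hy)
          simp [this]
        have hfilter2 : (ks ++ [x]).filter (fun k => decide (¬ k ∈ pvPreferredOrder)) =
            ks.filter (fun k => decide (¬ k ∈ pvPreferredOrder)) ++ [x] := by
          rw [List.filter_append, List.filter_cons, if_pos (by simp [hxP]), List.filter_nil]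
        rw [PySem.List.insertBy_of_forall_not_before _ _ _ hno, hfilter1, hfilter2,
          List.append_assoc]

-- A's partition (preferred-in-schema-order first, then the rest) is the rank-sorted order
theorem pv_part_eq (ks : List String) (hnd : ks.Nodup) :
    pvPreferredOrder.filter (fun k => k ∈ ks) ++
      ks.filter (fun k => ¬ k ∈ pvPreferredOrder.filter (fun k => k ∈ ks))
      = PySem.List.sorted ks pvFieldKey := by
  rw [pv_sorted_rank ks hnd]
  congr 1
  refine List.filter_congr ?_
  intro k hk
  have : (k ∈ pvPreferredOrder.filter (fun k => k ∈ ks)) ↔ k ∈ pvPreferredOrder := by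
    simp [List.mem_filter, hk]
  simp [this]

theorem pv_select_eq (rows : List (List (String × String))) :
    pvSelectFields rows = pvSelectFieldsAlt rows := by
  by_cases h0 : rows = []
  · subst h0; rfl
  · unfold pvSelectFields pvSelectFieldsAlt
    rw [if_neg h0, pv_allKeys_gen (fun r => (PySem.Dict.ofList r).keys) rows []]
    exact pv_part_eq _ (PySem.List.nodup_dedup _)

theorem pv_intercalate_cons (s a : List Char) (xs : List (List Char)) (h : xs ≠ []) :
    s.intercalate (a :: xs) = a ++ s ++ s.intercalate xs := by
  cases xs with
  | nil => exact absurd rfl h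
  | cons b t => simp [List.intercalate, List.append_assoc]

theorem pv_join_cons (s a : String) (xs : List String) (h : xs ≠ []) :
    PySem.Str.join s (a :: xs) = a ++ s ++ PySem.Str.join s xs := by
  simp only [PySem.Str.join, PySem.Chars.join, List.map_cons]
  rw [pv_intercalate_cons _ _ _ (by simpa using h)]
  rw [String.ofList_append, String.ofList_append, String.ofList_toList, String.ofList_toList]

-- both table assemblies produce the same joined lines
theorem pv_table_eq (fields : List String) (display : List (List (String × String))) (hd : display ≠ []) :
    ("| " ++ PySem.Str.join " | " ("#" :: fields) ++ " |\n") ++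
      ("| " ++ PySem.Str.join " | " (List.replicate ("#" :: fields).length "---") ++ " |\n") ++
      PySem.Str.join "\n" ((PySem.List.enumerate display 1).map (fun ir =>
        "| " ++ PySem.Str.join " | " (pvEscapeMd (PySem.Int.toStr ir.1) ::
          fields.map (fun f => pvEscapeMd ((PySem.Dict.ofList ir.2).getD f ""))) ++ " |"))
    = PySem.Str.join "\n"
        ((PySem.Str.join " | " ("#" :: fields) ::
          PySem.Str.join " | " (List.replicate ("#" :: fields).length "---") ::
          (PySem.List.enumerate display 1).map (fun ir =>
            PySem.Str.join " | " (([PySem.Int.toStr ir.1] ++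
              fields.map (fun f => (PySem.Dict.ofList ir.2).getD f "")).map pvEscapeMd))).map
          (fun ln => "| " ++ ln ++ " |")) := by
  have hz : PySem.List.enumerate display 1 ≠ [] := by
    cases display with
    | nil => exact absurd rfl hd
    | cons a t => simp [PySem.List.enumerate]
  rw [List.map_cons, List.map_cons, List.map_map,
    pv_join_cons "\n" ("| " ++ PySem.Str.join " | " ("#" :: fields) ++ " |") _ (by simp),
    pv_join_cons "\n" ("| " ++ PySem.Str.join " | " (List.replicate ("#" :: fields).length "---") ++ " |") _
      (by simpa using hz)]
  have hmap : ∀ ir ∈ PySem.List.enumerate display 1,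
      ((fun ln => "| " ++ ln ++ " |") ∘ (fun ir : Int × List (String × String) =>
        PySem.Str.join " | " (([PySem.Int.toStr ir.1] ++
          fields.map (fun f => (PySem.Dict.ofList ir.2).getD f "")).map pvEscapeMd))) ir
      = "| " ++ PySem.Str.join " | " (pvEscapeMd (PySem.Int.toStr ir.1) ::
          fields.map (fun f => pvEscapeMd ((PySem.Dict.ofList ir.2).getD f ""))) ++ " |" := by
    intro ir _
    simp [List.map_map, Function.comp_def]
  rw [List.map_congr_left hmap]
  have hlit : (" |\n" : String) = " |" ++ "\n" := rfl
  simp only [hlit, String.append_assoc]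

theorem pv_slice50_ne_nil {α : Type} (rows : List α) (h : rows ≠ []) :
    PySem.List.slice rows none (some 50) ≠ [] := by
  cases rows with
  | nil => exact absurd rfl h
  | cons a t => simp [PySem.List.slice, PySem.List.clampIdx]

-- ===== VERDICT (by name: the statement is the Claim_ definition above) =====
theorem build_gradebook_entries_markdown_table_py_spec : Claim_equal_build_gradebook_entries_markdown_table_py := by
  intro rows _
  unfold Spec_build_gradebook_entries_markdown_table_py
  unfold build_gradebook_entries_markdown_table_py build_gradebook_entries_markdown_table_py_alt
  by_cases h0 : rows = []
  · simp [h0]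
  · simp only [if_neg h0, pv_select_eq]
    split_ifs with hF hT
    · rfl
    · rw [pv_table_eq _ _ (pv_slice50_ne_nil rows h0)]
    · rw [pv_table_eq _ _ (pv_slice50_ne_nil rows h0)]
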